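-- pv_equiv track=rewrite | github.com/jessicacohen554-cyber/hourly-cfe-optimizer | compute_lmp_prices.py | _hour_to_month
-- ===== SOURCE A (Python) =====
-- def _hour_to_month(hour):
--     """Convert hour-of-year (0-8759) to month (1-12)."""
--     month_hours = [744, 672, 744, 720, 744, 720, 744, 744, 720, 744, 720, 744]
--     cumulative = 0
--     for m, mh in enumerate(month_hours, 1):
--         cumulative += mh
--         if hour < cumulative:
--             return m
--     return 12
-- ===== SOURCE B (Python) =====
-- import bisect
--
-- _BOUNDS = [744, 1416, 2160, 2880, 3624, 4344, 5088, 5832, 6552, 7296, 8016]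
--
-- def _hour_to_month(hour):
--     """Convert hour-of-year (0-8759) to month (1-12)."""
--     return bisect.bisect_right(_BOUNDS, hour) + 1
-- ===== Notes on version B (the rewrite author's own statement) =====
-- stated objective: idiomatic
-- what changed: Replaces the linear accumulate-and-compare loop with bisect_right over a precomputed prefix-sum table of month boundaries (the table omits the final year-end sum, so hours at or beyond the last boundary yield the last month, matching A's end-of-loop cap).
import Mathlib
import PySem

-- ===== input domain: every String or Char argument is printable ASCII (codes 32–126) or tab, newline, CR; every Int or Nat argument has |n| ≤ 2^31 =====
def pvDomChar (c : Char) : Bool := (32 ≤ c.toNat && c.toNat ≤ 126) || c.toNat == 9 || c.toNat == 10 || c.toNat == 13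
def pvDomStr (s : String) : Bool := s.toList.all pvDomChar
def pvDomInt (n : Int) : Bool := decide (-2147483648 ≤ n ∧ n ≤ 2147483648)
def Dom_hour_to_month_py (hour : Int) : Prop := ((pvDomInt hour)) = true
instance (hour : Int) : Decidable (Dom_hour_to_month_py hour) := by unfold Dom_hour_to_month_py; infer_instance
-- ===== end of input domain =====

-- ===== PORT A =====
-- A: accumulate month lengths, return the first month index whose cumulative total exceeds hour.
def hourToMonthGo (hour : Int) (cumulative : Int) (m : Int) : List Int → Int
  | [] => 12
  | mh :: rest =>
      if hour < cumulative + mh then m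
      else hourToMonthGo hour (cumulative + mh) (m + 1) rest

def hour_to_month_py (hour : Int) : Int :=
  hourToMonthGo hour 0 1 [744, 672, 744, 720, 744, 720, 744, 744, 720, 744, 720, 744]

-- ===== PORT B =====
-- B: bisect_right over the prefix-sum boundary table, then +1.
-- bisect.bisect_right on a sorted list = length of the prefix of elements ≤ hour.
def hour_to_month_py_alt (hour : Int) : Int :=
  (([744, 1416, 2160, 2880, 3624, 4344, 5088, 5832, 6552, 7296, 8016].takeWhile
      (fun b => decide (b ≤ hour))).length : Int) + 1

-- ===== PRECONDITION & SPEC =====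
def Spec_hour_to_month_py (hour : Int) (out : Int) : Prop := out = hour_to_month_py_alt hour
instance (hour : Int) (out : Int) : Decidable (Spec_hour_to_month_py hour out) := by unfold Spec_hour_to_month_py; infer_instance

-- ===== CLAIM (what is proved, stated in full; the proofs are below) =====
def Claim_equal_hour_to_month_py : Prop := ∀ (hour : Int), Dom_hour_to_month_py hour → Spec_hour_to_month_py hour (hour_to_month_py hour)

-- ===== LEMMAS AND PROOFS =====

-- ===== VERDICT (by name: the statement is the Claim_ definition above) =====
theorem hour_to_month_py_spec : Claim_equal_hour_to_month_py := by
  intro hour _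
  unfold Spec_hour_to_month_py hour_to_month_py hour_to_month_py_alt
  by_cases h744 : hour < 744
  · simp [hourToMonthGo, List.takeWhile, h744, show ¬((744:Int) ≤ hour) from by omega, show ¬((1416:Int) ≤ hour) from by omega, show ¬((2160:Int) ≤ hour) from by omega, show ¬((2880:Int) ≤ hour) from by omega, show ¬((3624:Int) ≤ hour) from by omega, show ¬((4344:Int) ≤ hour) from by omega, show ¬((5088:Int) ≤ hour) from by omega, show ¬((5832:Int) ≤ hour) from by omega, show ¬((6552:Int) ≤ hour) from by omega, show ¬((7296:Int) ≤ hour) from by omega, show ¬((8016:Int) ≤ hour) from by omega]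
  by_cases h1416 : hour < 1416
  · simp [hourToMonthGo, List.takeWhile, h744, h1416, show (744:Int) ≤ hour from by omega, show ¬((1416:Int) ≤ hour) from by omega, show ¬((2160:Int) ≤ hour) from by omega, show ¬((2880:Int) ≤ hour) from by omega, show ¬((3624:Int) ≤ hour) from by omega, show ¬((4344:Int) ≤ hour) from by omega, show ¬((5088:Int) ≤ hour) from by omega, show ¬((5832:Int) ≤ hour) from by omega, show ¬((6552:Int) ≤ hour) from by omega, show ¬((7296:Int) ≤ hour) from by omega, show ¬((8016:Int) ≤ hour) from by omega]
  by_cases h2160 : hour < 2160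
  · simp [hourToMonthGo, List.takeWhile, h744, h1416, h2160, show (744:Int) ≤ hour from by omega, show (1416:Int) ≤ hour from by omega, show ¬((2160:Int) ≤ hour) from by omega, show ¬((2880:Int) ≤ hour) from by omega, show ¬((3624:Int) ≤ hour) from by omega, show ¬((4344:Int) ≤ hour) from by omega, show ¬((5088:Int) ≤ hour) from by omega, show ¬((5832:Int) ≤ hour) from by omega, show ¬((6552:Int) ≤ hour) from by omega, show ¬((7296:Int) ≤ hour) from by omega, show ¬((8016:Int) ≤ hour) from by omega]
  by_cases h2880 : hour < 2880
  · simp [hourToMonthGo, List.takeWhile, h744, h1416, h2160, h2880, show (744:Int) ≤ hour from by omega, show (1416:Int) ≤ hour from by omega, show (2160:Int) ≤ hour from by omega, show ¬((2880:Int) ≤ hour) from by omega, show ¬((3624:Int) ≤ hour) from by omega, show ¬((4344:Int) ≤ hour) from by omega, show ¬((5088:Int) ≤ hour) from by omega, show ¬((5832:Int) ≤ hour) from by omega, show ¬((6552:Int) ≤ hour) from by omega, show ¬((7296:Int) ≤ hour) from by omega, show ¬((8016:Int) ≤ hour) from by omega]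
  by_cases h3624 : hour < 3624
  · simp [hourToMonthGo, List.takeWhile, h744, h1416, h2160, h2880, h3624, show (744:Int) ≤ hour from by omega, show (1416:Int) ≤ hour from by omega, show (2160:Int) ≤ hour from by omega, show (2880:Int) ≤ hour from by omega, show ¬((3624:Int) ≤ hour) from by omega, show ¬((4344:Int) ≤ hour) from by omega, show ¬((5088:Int) ≤ hour) from by omega, show ¬((5832:Int) ≤ hour) from by omega, show ¬((6552:Int) ≤ hour) from by omega, show ¬((7296:Int) ≤ hour) from by omega, show ¬((8016:Int) ≤ hour) from by omega]
  by_cases h4344 : hour < 4344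
  · simp [hourToMonthGo, List.takeWhile, h744, h1416, h2160, h2880, h3624, h4344, show (744:Int) ≤ hour from by omega, show (1416:Int) ≤ hour from by omega, show (2160:Int) ≤ hour from by omega, show (2880:Int) ≤ hour from by omega, show (3624:Int) ≤ hour from by omega, show ¬((4344:Int) ≤ hour) from by omega, show ¬((5088:Int) ≤ hour) from by omega, show ¬((5832:Int) ≤ hour) from by omega, show ¬((6552:Int) ≤ hour) from by omega, show ¬((7296:Int) ≤ hour) from by omega, show ¬((8016:Int) ≤ hour) from by omega]
  by_cases h5088 : hour < 5088
  · simp [hourToMonthGo, List.takeWhile, h744, h1416, h2160, h2880, h3624, h4344, h5088, show (744:Int) ≤ hour from by omega, show (1416:Int) ≤ hour from by omega, show (2160:Int) ≤ hour from by omega, show (2880:Int) ≤ hour from by omega, show (3624:Int) ≤ hour from by omega, show (4344:Int) ≤ hour from by omega, show ¬((5088:Int) ≤ hour) from by omega, show ¬((5832:Int) ≤ hour) from by omega, show ¬((6552:Int) ≤ hour) from by omega, show ¬((7296:Int) ≤ hour) from by omega, show ¬((8016:Int) ≤ hour) from by omega]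
  by_cases h5832 : hour < 5832
  · simp [hourToMonthGo, List.takeWhile, h744, h1416, h2160, h2880, h3624, h4344, h5088, h5832, show (744:Int) ≤ hour from by omega, show (1416:Int) ≤ hour from by omega, show (2160:Int) ≤ hour from by omega, show (2880:Int) ≤ hour from by omega, show (3624:Int) ≤ hour from by omega, show (4344:Int) ≤ hour from by omega, show (5088:Int) ≤ hour from by omega, show ¬((5832:Int) ≤ hour) from by omega, show ¬((6552:Int) ≤ hour) from by omega, show ¬((7296:Int) ≤ hour) from by omega, show ¬((8016:Int) ≤ hour) from by omega]
  by_cases h6552 : hour < 6552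
  · simp [hourToMonthGo, List.takeWhile, h744, h1416, h2160, h2880, h3624, h4344, h5088, h5832, h6552, show (744:Int) ≤ hour from by omega, show (1416:Int) ≤ hour from by omega, show (2160:Int) ≤ hour from by omega, show (2880:Int) ≤ hour from by omega, show (3624:Int) ≤ hour from by omega, show (4344:Int) ≤ hour from by omega, show (5088:Int) ≤ hour from by omega, show (5832:Int) ≤ hour from by omega, show ¬((6552:Int) ≤ hour) from by omega, show ¬((7296:Int) ≤ hour) from by omega, show ¬((8016:Int) ≤ hour) from by omega]
  by_cases h7296 : hour < 7296
  · simp [hourToMonthGo, List.takeWhile, h744, h1416, h2160, h2880, h3624, h4344, h5088, h5832, h6552, h7296, show (744:Int) ≤ hour from by omega, show (1416:Int) ≤ hour from by omega, show (2160:Int) ≤ hour from by omega, show (2880:Int) ≤ hour from by omega, show (3624:Int) ≤ hour from by omega, show (4344:Int) ≤ hour from by omega, show (5088:Int) ≤ hour from by omega, show (5832:Int) ≤ hour from by omega, show (6552:Int) ≤ hour from by omega, show ¬((7296:Int) ≤ hour) from by omega, show ¬((8016:Int) ≤ hour) from by omega]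
  by_cases h8016 : hour < 8016
  · simp [hourToMonthGo, List.takeWhile, h744, h1416, h2160, h2880, h3624, h4344, h5088, h5832, h6552, h7296, h8016, show (744:Int) ≤ hour from by omega, show (1416:Int) ≤ hour from by omega, show (2160:Int) ≤ hour from by omega, show (2880:Int) ≤ hour from by omega, show (3624:Int) ≤ hour from by omega, show (4344:Int) ≤ hour from by omega, show (5088:Int) ≤ hour from by omega, show (5832:Int) ≤ hour from by omega, show (6552:Int) ≤ hour from by omega, show (7296:Int) ≤ hour from by omega, show ¬((8016:Int) ≤ hour) from by omega]
  simp [hourToMonthGo, List.takeWhile, h744, h1416, h2160, h2880, h3624, h4344, h5088, h5832, h6552, h7296, h8016, show (744:Int) ≤ hour from by omega, show (1416:Int) ≤ hour from by omega, show (2160:Int) ≤ hour from by omega, show (2880:Int) ≤ hour from by omega, show (3624:Int) ≤ hour from by omega, show (4344:Int) ≤ hour from by omega, show (5088:Int) ≤ hour from by omega, show (5832:Int) ≤ hour from by omega, show (6552:Int) ≤ hour from by omega, show (7296:Int) ≤ hour from by omega, show (8016:Int) ≤ hour from by omega]
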